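-- pv_equiv track=rewrite | github.com/user160244980349/sde-math | mathematics/sde/nonlinear/symbolic/schemes/strong_taylor_stratonovich_3p0_mp.py | ranges
-- ===== SOURCE A (Python) =====
-- def ranges(limit, size):
--     chunks = []
--     counter = 0
--     chunk = (0, 0), (0, 0), (0, 0)
--
--     for i1 in range(limit):
--         for i2 in range(limit):
--             for i3 in range(limit):
--                 counter += 1
--                 if counter > size:
--                     counter = 0
--                     chunk = (chunk[0][1], i1), (chunk[1][1], i2), (chunk[2][1], i3)
--                     chunks.append(chunk)
--                     continue
--
--     return chunks
-- ===== SOURCE B (Python) =====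
-- def ranges(limit, size):
--     # Jump straight to each chunk boundary and decode its flat index; O(limit^3/(size+1)) instead of O(limit^3).
--     step = (size if size > 0 else 0) + 1
--     total = limit ** 3 if limit > 0 else 0
--     n = total // step
--     chunks = []
--     prev = (0, 0, 0)
--     for k in range(1, n + 1):
--         t = k * step - 1
--         i1 = t // (limit * limit)
--         r = t % (limit * limit)
--         i2 = r // limit
--         i3 = r % limit
--         chunks.append(((prev[0], i1), (prev[1], i2), (prev[2], i3)))
--         prev = (i1, i2, i3)
--     return chunks
-- ===== Notes on version B (the rewrite author's own statement) =====
-- stated objective: faster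
-- what changed: Instead of walking all limit^3 lexicographic triples with a counter, B computes the number of chunks as limit^3 // (max(size,0)+1) and, for each chunk, decodes its boundary flat index k*(size+1)-1 directly via // and %, looping only over chunks.
import Mathlib
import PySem

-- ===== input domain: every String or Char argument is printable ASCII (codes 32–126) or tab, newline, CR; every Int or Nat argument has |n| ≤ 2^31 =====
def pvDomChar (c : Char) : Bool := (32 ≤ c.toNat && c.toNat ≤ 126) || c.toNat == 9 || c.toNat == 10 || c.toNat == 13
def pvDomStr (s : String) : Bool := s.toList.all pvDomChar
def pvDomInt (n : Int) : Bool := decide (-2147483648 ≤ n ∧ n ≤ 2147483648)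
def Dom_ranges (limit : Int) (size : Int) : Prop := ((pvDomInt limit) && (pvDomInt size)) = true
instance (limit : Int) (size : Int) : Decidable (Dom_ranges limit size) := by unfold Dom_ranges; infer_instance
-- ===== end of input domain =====

-- B replaces A's walk over all limit^3 lexicographic triples by a loop over chunk boundaries only,
-- decoding each boundary flat index k*(size+1)-1 with // and % (objective: faster, asymptotically).


-- ===== PORT A =====
-- state: (chunks, counter, chunk); a chunk tuple of three pairs is appended as a 3-element list of pairs
def ranges (limit : Int) (size : Int) : List (List (Int × Int)) :=
  let init : List (List (Int × Int)) × Int × ((Int × Int) × (Int × Int) × (Int × Int)) :=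
    ([], 0, ((0, 0), (0, 0), (0, 0)))
  let st := (PySem.List.pyRange 0 limit 1).foldl (fun s i1 =>
    (PySem.List.pyRange 0 limit 1).foldl (fun s i2 =>
      (PySem.List.pyRange 0 limit 1).foldl (fun s i3 =>
        let counter := s.2.1 + 1
        if counter > size then
          let ch := ((s.2.2.1.2, i1), (s.2.2.2.1.2, i2), (s.2.2.2.2.2, i3))
          (s.1 ++ [[ch.1, ch.2.1, ch.2.2]], (0 : Int), ch)
        else (s.1, counter, s.2.2)) s) s) init
  st.1

-- ===== PORT B =====
-- Source B never divides by zero at run time: the loop body (the only place `//`/`%` occur) runs only when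
-- n ≥ 1, which forces limit > 0; PySem.Int.floordiv/mod are total, so no Pre_ is needed.
def ranges_alt (limit : Int) (size : Int) : List (List (Int × Int)) :=
  let step := (if size > 0 then size else 0) + 1
  let total := if limit > 0 then limit ^ 3 else 0
  let n := PySem.Int.floordiv total step
  let st := (PySem.List.pyRange 1 (n + 1) 1).foldl
    (fun (s : List (List (Int × Int)) × (Int × Int × Int)) k =>
      let t := k * step - 1
      let i1 := PySem.Int.floordiv t (limit * limit)
      let r := PySem.Int.mod t (limit * limit)
      let i2 := PySem.Int.floordiv r limit
      let i3 := PySem.Int.mod r limit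
      (s.1 ++ [[(s.2.1, i1), (s.2.2.1, i2), (s.2.2.2, i3)]], (i1, i2, i3)))
    ([], (0, 0, 0))
  st.1

-- ===== PRECONDITION & SPEC =====
def Spec_ranges (limit : Int) (size : Int) (out : List (List (Int × Int))) : Prop := out = ranges_alt limit size
instance (limit : Int) (size : Int) (out : List (List (Int × Int))) : Decidable (Spec_ranges limit size out) := by unfold Spec_ranges; infer_instance

-- ===== CLAIM (what is proved, stated in full; the proofs are below) =====
def Claim_equal_ranges : Prop := ∀ (limit : Int) (size : Int), Dom_ranges limit size → Spec_ranges limit size (ranges limit size)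

-- ===== LEMMAS AND PROOFS =====

-- chunk built from the previous boundary q and the current triple x
def mkC (q x : Int × Int × Int) : List (Int × Int) := [(q.1, x.1), (q.2.1, x.2.1), (q.2.2, x.2.2)]

-- the second components of A's chunk-of-pairs state
def snds (p : (Int × Int) × (Int × Int) × (Int × Int)) : Int × Int × Int := (p.1.2, p.2.1.2, p.2.2.2)

-- A's loop body as a function of the flattened triple
def fA (size : Int) (s : List (List (Int × Int)) × Int × ((Int × Int) × (Int × Int) × (Int × Int)))
    (x : Int × Int × Int) : List (List (Int × Int)) × Int × ((Int × Int) × (Int × Int) × (Int × Int)) :=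
  let counter := s.2.1 + 1
  if counter > size then
    let ch := ((s.2.2.1.2, x.1), (s.2.2.2.1.2, x.2.1), (s.2.2.2.2.2, x.2.2))
    (s.1 ++ [[ch.1, ch.2.1, ch.2.2]], (0 : Int), ch)
  else (s.1, counter, s.2.2)

-- the lexicographic triples A iterates over, flattened
def triplesL (limit : Int) : List (Int × Int × Int) :=
  (PySem.List.pyRange 0 limit 1).flatMap (fun i1 =>
    (PySem.List.pyRange 0 limit 1).flatMap (fun i2 =>
      (PySem.List.pyRange 0 limit 1).map (fun i3 => (i1, i2, i3))))

-- chunks produced from the rest of the flat list, counter c, previous boundary q (Int counter)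
def gA (size : Int) : List (Int × Int × Int) → Int → (Int × Int × Int) → List (List (Int × Int))
  | [], _, _ => []
  | x :: ts, c, q => if c + 1 > size then mkC q x :: gA size ts 0 x else gA size ts (c + 1) q

-- same with a Nat counter, firing when the counter has reached S'
def hA (S' : Nat) : List (Int × Int × Int) → Nat → (Int × Int × Int) → List (List (Int × Int))
  | [], _, _ => []
  | x :: ts, r, q => if S' ≤ r then mkC q x :: hA S' ts 0 x else hA S' ts (r + 1) q

-- decode a flat index the way B does
def decN (L t : Nat) : Int × Int × Int := (((t / (L * L) : Nat) : Int), ((t % (L * L) / L : Nat) : Int), ((t % (L * L) % L : Nat) : Int))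

-- B's chunk chain: m chunks remaining, next chunk number k
def blB (L stepN : Nat) : Nat → Nat → (Int × Int × Int) → List (List (Int × Int))
  | 0, _, _ => []
  | m + 1, k, q => mkC q (decN L (k * stepN - 1)) :: blB L stepN m (k + 1) (decN L (k * stepN - 1))

theorem ranges_eq_foldA (limit size : Int) :
    ranges limit size = ((triplesL limit).foldl (fA size) ([], 0, ((0,0),(0,0),(0,0)))).1 := by
  simp only [ranges, triplesL, List.foldl_flatMap, List.foldl_map, fA]

theorem foldA_chunks (size : Int) (ts : List (Int × Int × Int)) :
    ∀ (cs : List (List (Int × Int))) (c : Int) (p : (Int × Int) × (Int × Int) × (Int × Int)),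
      ((ts.foldl (fA size) (cs, c, p)).1 : List (List (Int × Int))) = cs ++ gA size ts c (snds p) := by
  induction ts with
  | nil => intro cs c p; simp [gA]
  | cons x ts ih =>
    intro cs c p
    simp only [List.foldl_cons, fA, gA, snds]
    by_cases h : c + 1 > size
    · simp only [h, if_pos]
      rw [ih]
      simp [mkC, snds]
    · simp only [h, if_false]
      rw [ih]
      simp [snds]


theorem gA_eq_hA (size : Int) (ts : List (Int × Int × Int)) :
    ∀ (c : Int) (q : Int × Int × Int), 0 ≤ c → gA size ts c q = hA size.toNat ts c.toNat q := by
  induction ts with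
  | nil => intro c q _; simp [gA, hA]
  | cons x ts ih =>
    intro c q hc
    simp only [gA, hA]
    by_cases h : c + 1 > size
    · rw [if_pos h, if_pos (by omega)]
      rw [ih 0 x le_rfl]
      rfl
    · rw [if_neg h, if_neg (by omega)]
      rw [ih (c+1) q (by omega)]
      congr 1
      omega


theorem hA_step (S' : Nat) (ts : List (Int × Int × Int)) :
    ∀ (r : Nat) (q : Int × Int × Int), r ≤ S' →
      hA S' ts r q = if h : S' - r < ts.length
        then mkC q (ts[S' - r]'h) :: hA S' (ts.drop (S' - r + 1)) 0 (ts[S' - r]'h)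
        else [] := by
  induction ts with
  | nil => intro r q _; simp [hA]
  | cons x ts ih =>
    intro r q hr
    simp only [hA]
    by_cases h : S' ≤ r
    · rw [if_pos h]
      have h0 : S' - r = 0 := by omega
      rw [h0, dif_pos (by simp)]
      simp
    · rw [if_neg h]
      rw [ih (r+1) q (by omega)]
      have e1 : S' - r = (S' - (r+1)) + 1 := by omega
      by_cases h2 : S' - (r+1) < ts.length
      · rw [dif_pos h2, dif_pos (by simp; omega)]
        congr 1 <;> [skip; congr 1] <;> simp [e1]
      · rw [dif_neg h2, dif_neg (by simp; omega)]

theorem length_flatMap_const {α β : Type} (f : α → List β) (c : Nat) (l : List α)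
    (hc : ∀ x ∈ l, (f x).length = c) : (l.flatMap f).length = l.length * c := by
  induction l with
  | nil => simp
  | cons x l ih =>
    simp only [List.flatMap_cons, List.length_append, List.length_cons]
    rw [hc x (by simp), ih (fun y hy => hc y (by simp [hy]))]
    ring


theorem getElem?_flatMap_const {α β : Type} (f : α → List β) (c : Nat)
    (l : List α) (hc : ∀ x ∈ l, (f x).length = c) :
    ∀ (q r : Nat) (hq : q < l.length), r < c → (l.flatMap f)[q * c + r]? = (f (l[q]'hq))[r]? := by
  induction l with
  | nil => intro q r hq _; simp at hq
  | cons x l ih =>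
    intro q r hq hr
    cases q with
    | zero =>
      simp only [List.flatMap_cons, Nat.zero_mul, Nat.zero_add]
      rw [List.getElem?_append_left (by rw [hc x (by simp)]; exact hr)]
      rfl
    | succ q =>
      simp only [List.flatMap_cons]
      rw [List.getElem?_append_right (by rw [hc x (by simp)]; nlinarith [Nat.succ_mul q c])]
      rw [hc x (by simp)]
      have e : (q + 1) * c + r - c = q * c + r := by rw [Nat.succ_mul]; omega
      rw [e, ih (fun y hy => hc y (by simp [hy])) q r (by simpa using hq) hr]
      rfl


theorem length_triplesL (limit : Int) : (triplesL limit).length = limit.toNat ^ 3 := by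
  unfold triplesL
  rw [length_flatMap_const _ (limit.toNat ^ 2)]
  · simp [PySem.List.length_pyRange_one]; ring
  · intro x _
    rw [length_flatMap_const _ limit.toNat]
    · simp [PySem.List.length_pyRange_one]; ring
    · intro y _; simp [PySem.List.length_pyRange_one]


theorem getElem?_triplesL_dec (limit : Int) (a b c : Nat)
    (ha : a < limit.toNat) (hb : b < limit.toNat) (hc : c < limit.toNat) :
    (triplesL limit)[a * (limit.toNat * limit.toNat) + b * limit.toNat + c]?
      = some (((a : Int), (b : Int), (c : Int))) := by
  unfold triplesL
  have hlen1 : (PySem.List.pyRange 0 limit 1).length = limit.toNat := by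
    simp [PySem.List.length_pyRange_one]
  have e : a * (limit.toNat * limit.toNat) + b * limit.toNat + c
      = a * (limit.toNat ^ 2) + (b * limit.toNat + c) := by ring
  rw [e, getElem?_flatMap_const _ (limit.toNat ^ 2) _ ?hc1 a (b * limit.toNat + c) (by omega) ?hr1]
  case hc1 =>
    intro x _
    rw [length_flatMap_const _ limit.toNat _ (fun y _ => by simp [PySem.List.length_pyRange_one]), hlen1]
    ring
  case hr1 => rw [pow_two]; nlinarith
  rw [getElem?_flatMap_const _ limit.toNat _ (fun y _ => by simp [PySem.List.length_pyRange_one]) b c (by omega) hc]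
  rw [List.getElem?_map, PySem.List.getElem?_pyRange_one]
  rw [if_pos (by simpa using hc)]
  rw [PySem.List.getElem_pyRange_one, PySem.List.getElem_pyRange_one]
  simp


theorem getElem?_triplesL (limit : Int) (t : Nat) (ht : t < limit.toNat ^ 3) :
    (triplesL limit)[t]? = some (decN limit.toNat t) := by
  have hL : 0 < limit.toNat := Nat.pos_of_ne_zero (fun h => by simp [h] at ht)
  have h1 := Nat.mod_add_div' t (limit.toNat * limit.toNat)
  have h2 := Nat.mod_add_div' (t % (limit.toNat * limit.toNat)) limit.toNat
  have e : t = (t / (limit.toNat * limit.toNat)) * (limit.toNat * limit.toNat)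
      + (t % (limit.toNat * limit.toNat) / limit.toNat) * limit.toNat
      + (t % (limit.toNat * limit.toNat) % limit.toNat) := by omega
  have ha : t / (limit.toNat * limit.toNat) < limit.toNat := by
    apply Nat.div_lt_of_lt_mul
    calc t < limit.toNat ^ 3 := ht
      _ = (limit.toNat * limit.toNat) * limit.toNat := by ring
  have hmod : t % (limit.toNat * limit.toNat) < limit.toNat * limit.toNat :=
    Nat.mod_lt _ (by positivity)
  have hb : t % (limit.toNat * limit.toNat) / limit.toNat < limit.toNat :=
    Nat.div_lt_of_lt_mul hmod
  have hc : t % (limit.toNat * limit.toNat) % limit.toNat < limit.toNat := Nat.mod_lt _ hL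
  rw [show ((triplesL limit)[t]? = some (decN limit.toNat t))
    = ((triplesL limit)[(t / (limit.toNat * limit.toNat)) * (limit.toNat * limit.toNat)
      + (t % (limit.toNat * limit.toNat) / limit.toNat) * limit.toNat
      + (t % (limit.toNat * limit.toNat) % limit.toNat)]? = some (decN limit.toNat t)) from by rw [← e]]
  rw [getElem?_triplesL_dec limit _ _ _ ha hb hc]
  rfl

theorem hA_main (limit : Int) (stepN : Nat) (hs : 0 < stepN) :
    ∀ (m j : Nat) (q : Int × Int × Int), j + m = limit.toNat ^ 3 / stepN →
      hA (stepN - 1) ((triplesL limit).drop (j * stepN)) 0 q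
        = blB limit.toNat stepN m (j + 1) q := by
  intro m
  induction m with
  | zero =>
    intro j q hj
    have hlen : ((triplesL limit).drop (j * stepN)).length = limit.toNat ^ 3 - j * stepN := by
      rw [List.length_drop, length_triplesL]
    have hmd := Nat.mod_add_div' (limit.toNat ^ 3) stepN
    have hmlt := Nat.mod_lt (limit.toNat ^ 3) hs
    have hj' : j = limit.toNat ^ 3 / stepN := by omega
    subst hj'
    rw [hA_step _ _ 0 q (Nat.zero_le _), dif_neg (by rw [hlen]; omega)]
    rfl
  | succ m ih =>
    intro j q hj
    have hnm : (j + 1) * stepN ≤ limit.toNat ^ 3 := by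
      have h1 : j + 1 ≤ limit.toNat ^ 3 / stepN := by omega
      calc (j + 1) * stepN ≤ (limit.toNat ^ 3 / stepN) * stepN := Nat.mul_le_mul_right _ h1
        _ ≤ limit.toNat ^ 3 := Nat.div_mul_le_self _ _
    have hlen : ((triplesL limit).drop (j * stepN)).length = limit.toNat ^ 3 - j * stepN := by
      rw [List.length_drop, length_triplesL]
    have hlt : stepN - 1 - 0 < ((triplesL limit).drop (j * stepN)).length := by
      rw [hlen]; have hsm : (j + 1) * stepN = j * stepN + stepN := by ring
      omega
    rw [hA_step _ _ 0 q (Nat.zero_le _), dif_pos hlt]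
    have htlt : j * stepN + (stepN - 1) < limit.toNat ^ 3 := by
      have hsm : (j + 1) * stepN = j * stepN + stepN := by ring
      omega
    have hget : ((triplesL limit).drop (j * stepN))[stepN - 1 - 0]'hlt
        = decN limit.toNat ((j + 1) * stepN - 1) := by
      have h1 : ((triplesL limit).drop (j * stepN))[stepN - 1 - 0]'hlt
          = (triplesL limit)[j * stepN + (stepN - 1 - 0)]'(by rw [length_triplesL]; omega) := by
        rw [List.getElem_drop]
      rw [h1]
      have h2 := getElem?_triplesL limit (j * stepN + (stepN - 1)) htlt
      have h3 : j * stepN + (stepN - 1) = (j + 1) * stepN - 1 := by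
        have hsm : (j + 1) * stepN = j * stepN + stepN := by ring
        omega
      rw [List.getElem_eq_iff]
      rw [show stepN - 1 - 0 = stepN - 1 from rfl, h2, h3]
    rw [hget]
    show _ = mkC q (decN limit.toNat ((j + 1) * stepN - 1))
        :: blB limit.toNat stepN m (j + 1 + 1) (decN limit.toNat ((j + 1) * stepN - 1))
    congr 1
    rw [List.drop_drop]
    have hd : j * stepN + (stepN - 1 - 0 + 1) = (j + 1) * stepN := by
      have hsm : (j + 1) * stepN = j * stepN + stepN := by ring
      omega
    rw [hd]
    exact ih (j + 1) _ (by omega)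

theorem foldB (limit : Int) (hpos : 0 < limit) (stepN : Nat) (hs : 0 < stepN) :
    ∀ (m k : Nat) (cs : List (List (Int × Int))) (q : Int × Int × Int), 1 ≤ k →
      (((PySem.List.pyRange (k : Int) ((k : Int) + (m : Int)) 1).foldl
        (fun (s : List (List (Int × Int)) × (Int × Int × Int)) kk =>
          let t := kk * ((stepN : Nat) : Int) - 1
          let i1 := PySem.Int.floordiv t (limit * limit)
          let r := PySem.Int.mod t (limit * limit)
          let i2 := PySem.Int.floordiv r limit
          let i3 := PySem.Int.mod r limit
          (s.1 ++ [[(s.2.1, i1), (s.2.2.1, i2), (s.2.2.2, i3)]], (i1, i2, i3)))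
        (cs, q)).1 : List (List (Int × Int))) = cs ++ blB limit.toNat stepN m k q := by
  intro m
  induction m with
  | zero =>
    intro k cs q hk
    rw [show ((k : Int) + ((0 : Nat) : Int)) = (k : Int) by push_cast; ring]
    rw [PySem.List.pyRange_one_eq_nil le_rfl]
    simp [blB]
  | succ m ih =>
    intro k cs q hk
    have hL : limit = (limit.toNat : Int) := (Int.toNat_of_nonneg (by omega)).symm
    rw [PySem.List.pyRange_one_cons (by push_cast; omega)]
    rw [List.foldl_cons]
    have ht : (k : Int) * ((stepN : Nat) : Int) - 1 = ((k * stepN - 1 : Nat) : Int) := by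
      have : 1 ≤ k * stepN := Nat.one_le_iff_ne_zero.mpr (by positivity)
      push_cast [this]; ring
    have hi1 : PySem.Int.floordiv ((k : Int) * ((stepN : Nat) : Int) - 1) (limit * limit)
        = ((k * stepN - 1) / (limit.toNat * limit.toNat) : Nat) := by
      rw [ht, hL]
      rw [← Int.natCast_mul, PySem.Int.floordiv_natCast]
      simp
    have hr : PySem.Int.mod ((k : Int) * ((stepN : Nat) : Int) - 1) (limit * limit)
        = ((k * stepN - 1) % (limit.toNat * limit.toNat) : Nat) := by
      rw [ht, hL]
      rw [← Int.natCast_mul, PySem.Int.mod_natCast]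
      simp
    have hi2 : PySem.Int.floordiv (((k * stepN - 1) % (limit.toNat * limit.toNat) : Nat) : Int) limit
        = ((k * stepN - 1) % (limit.toNat * limit.toNat) / limit.toNat : Nat) := by
      rw [hL, PySem.Int.floordiv_natCast]; simp
    have hi3 : PySem.Int.mod (((k * stepN - 1) % (limit.toNat * limit.toNat) : Nat) : Int) limit
        = ((k * stepN - 1) % (limit.toNat * limit.toNat) % limit.toNat : Nat) := by
      rw [hL, PySem.Int.mod_natCast]; simp
    show (List.foldl _ (cs ++ [[(q.1, _), (q.2.1, _), (q.2.2, _)]], (_, _, _)) _).1 = _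
    simp only [hi1, hr, hi2, hi3]
    rw [show (k : Int) + ((m + 1 : Nat) : Int) = ((k + 1 : Nat) : Int) + ((m : Nat) : Int) by push_cast; ring]
    rw [show ((k : Int) + 1) = ((k + 1 : Nat) : Int) by push_cast; ring]
    rw [ih (k + 1) _ _ (by omega)]
    simp only [blB, decN, mkC, List.append_assoc, List.cons_append, List.nil_append]


theorem ranges_alt_eq_blB (limit size : Int) :
    ranges_alt limit size
      = blB limit.toNat (size.toNat + 1) (limit.toNat ^ 3 / (size.toNat + 1)) 1 (0, 0, 0) := by
  have hstep : ((if size > 0 then size else 0) + 1 : Int) = ((size.toNat + 1 : Nat) : Int) := by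
    split_ifs with h <;> push_cast <;> omega
  by_cases hp : 0 < limit
  · have htot : (if limit > 0 then limit ^ 3 else (0 : Int)) = ((limit.toNat ^ 3 : Nat) : Int) := by
      rw [if_pos hp, show limit = ((limit.toNat : Nat) : Int) from (Int.toNat_of_nonneg (by omega)).symm]
      push_cast; simp
    have H := foldB limit hp (size.toNat + 1) (Nat.succ_pos _)
      (limit.toNat ^ 3 / (size.toNat + 1)) 1 [] (0, 0, 0) le_rfl
    rw [show ((1 : Nat) : Int) + ((limit.toNat ^ 3 / (size.toNat + 1) : Nat) : Int)
        = ((limit.toNat ^ 3 / (size.toNat + 1) : Nat) : Int) + 1 from by ring] at H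
    rw [show ((1 : Nat) : Int) = 1 from rfl] at H
    unfold ranges_alt
    simp only [hstep, htot, PySem.Int.floordiv_natCast]
    rw [H]
    simp
  · have htot : (if limit > 0 then limit ^ 3 else (0 : Int)) = (0 : Int) := by
      rw [if_neg (by omega)]
    have hL0 : limit.toNat = 0 := by omega
    unfold ranges_alt
    simp only [hstep, htot, hL0]
    rw [show (0 : Int) = ((0 : Nat) : Int) from rfl, PySem.Int.floordiv_natCast]
    rw [show (((0 / (size.toNat + 1) : Nat) : Int) + 1 : Int) = 1 from by simp]
    rw [PySem.List.pyRange_one_eq_nil le_rfl]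
    simp [blB]

-- ===== VERDICT (by name: the statement is the Claim_ definition above) =====
theorem ranges_spec : Claim_equal_ranges := by
  intro limit size _
  unfold Spec_ranges
  rw [ranges_eq_foldA, ranges_alt_eq_blB, foldA_chunks, gA_eq_hA size _ 0 _ le_rfl]
  show hA size.toNat (triplesL limit) 0 (snds ((0,0),(0,0),(0,0))) = _
  have h0 := hA_main limit (size.toNat + 1) (Nat.succ_pos _)
    (limit.toNat ^ 3 / (size.toNat + 1)) 0 (snds ((0,0),(0,0),(0,0))) (by omega)
  simpa [snds] using h0
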